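-- pv_equiv track=rewrite | github.com/Oluseyi-Kofoworola/gitops2-healthcare-intelligence-git-commit | tools/healthcare_commit_generator.py | _generate_monitoring_plan
-- ===== SOURCE A (Python) =====
-- from typing import List, Dict, Any, Optional, Tuple
--
-- def _generate_monitoring_plan(files: List[str]) -> str:
--     """Generate monitoring requirements based on affected components"""
--     if any("api" in f.lower() for f in files):
--         return "API response times, error rates, authentication metrics"
--     elif any(keyword in f.lower() for f in files for keyword in ["database", "db"]):
--         return "Database performance, query times, connection pools"
--     elif any("payment" in f.lower() for f in files):
--         return "Transaction success rate, payment latency, security events"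
--     elif any(keyword in f.lower() for f in files for keyword in ["phi", "patient"]):
--         return "PHI access logs, encryption status, audit trail completeness"
--     return "Application metrics, system health, user experience"
-- ===== SOURCE B (Python) =====
-- GROUPS = [("api", ["api"]),
--           ("db", ["database", "db"]),
--           ("payment", ["payment"]),
--           ("phi", ["phi", "patient"])]
--
-- PRIORITY = [("api", "API response times, error rates, authentication metrics"),
--             ("db", "Database performance, query times, connection pools"),
--             ("payment", "Transaction success rate, payment latency, security events"),
--             ("phi", "PHI access logs, encryption status, audit trail completeness")]
--
-- def _generate_monitoring_plan(files):
--     cats = set()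
--     for f in files:
--         low = f.lower()
--         for cat, kws in GROUPS:
--             if any(k in low for k in kws):
--                 cats.add(cat)
--     for cat, msg in PRIORITY:
--         if cat in cats:
--             return msg
--     return "Application metrics, system health, user experience"
-- ===== Notes on version B (the rewrite author's own statement) =====
-- stated objective: alternative
-- what changed: One pass over the files builds a set of matched category keys (lowercasing each filename once), then a fixed priority-ordered table is scanned for the first matched category, replacing A's four separate any-scans over the whole list.
import Mathlib
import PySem

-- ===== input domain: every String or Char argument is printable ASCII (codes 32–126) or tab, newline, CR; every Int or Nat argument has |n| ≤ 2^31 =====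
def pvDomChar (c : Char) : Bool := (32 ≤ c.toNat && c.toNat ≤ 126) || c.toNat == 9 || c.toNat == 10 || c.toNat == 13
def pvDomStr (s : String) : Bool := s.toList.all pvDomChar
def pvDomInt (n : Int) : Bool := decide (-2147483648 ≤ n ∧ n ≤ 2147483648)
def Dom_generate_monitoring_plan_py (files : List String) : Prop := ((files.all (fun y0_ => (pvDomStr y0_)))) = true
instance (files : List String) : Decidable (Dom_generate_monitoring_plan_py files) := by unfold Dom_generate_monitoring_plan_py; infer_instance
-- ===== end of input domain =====

-- B replaces A's four repeated any-scans by one pass that builds a set of matched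
-- category keys and then scans a fixed priority table (objective: alternative decomposition).

-- ===== PORT A =====
def generate_monitoring_plan_py (files : List String) : String :=
  if files.any (fun f => PySem.Str.isIn "api" (PySem.Str.lower f)) then
    "API response times, error rates, authentication metrics"
  else if files.any (fun f => ["database", "db"].any (fun k => PySem.Str.isIn k (PySem.Str.lower f))) then
    "Database performance, query times, connection pools"
  else if files.any (fun f => PySem.Str.isIn "payment" (PySem.Str.lower f)) then
    "Transaction success rate, payment latency, security events"
  else if files.any (fun f => ["phi", "patient"].any (fun k => PySem.Str.isIn k (PySem.Str.lower f))) then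
    "PHI access logs, encryption status, audit trail completeness"
  else
    "Application metrics, system health, user experience"

-- ===== PORT B =====
def pvGroups : List (String × List String) :=
  [("api", ["api"]), ("db", ["database", "db"]), ("payment", ["payment"]), ("phi", ["phi", "patient"])]

def pvPriority : List (String × String) :=
  [("api", "API response times, error rates, authentication metrics"),
   ("db", "Database performance, query times, connection pools"),
   ("payment", "Transaction success rate, payment latency, security events"),
   ("phi", "PHI access logs, encryption status, audit trail completeness")]

def pvStep (s : PySem.Set String) (f : String) : PySem.Set String :=
  let low := PySem.Str.lower f
  pvGroups.foldl (fun s p => if p.2.any (fun k => PySem.Str.isIn k low) then PySem.Set.add s p.1 else s) s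

def generate_monitoring_plan_py_alt (files : List String) : String :=
  let cats := files.foldl pvStep PySem.Set.empty
  match pvPriority.find? (fun p => PySem.Set.contains cats p.1) with
  | some p => p.2
  | none => "Application metrics, system health, user experience"

-- ===== PRECONDITION & SPEC =====
def Spec_generate_monitoring_plan_py (files : List String) (out : String) : Prop := out = generate_monitoring_plan_py_alt files
instance (files : List String) (out : String) : Decidable (Spec_generate_monitoring_plan_py files out) := by unfold Spec_generate_monitoring_plan_py; infer_instance

-- ===== CLAIM (what is proved, stated in full; the proofs are below) =====
def Claim_equal_generate_monitoring_plan_py : Prop := ∀ (files : List String), Dom_generate_monitoring_plan_py files → Spec_generate_monitoring_plan_py files (generate_monitoring_plan_py files)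

-- ===== LEMMAS AND PROOFS =====

lemma pv_mem_condAdd (groups : List (String × List String)) (C : String × List String → Bool)
    (s : PySem.Set String) (x : String) :
    x ∈ groups.foldl (fun s p => if C p then PySem.Set.add s p.1 else s) s
      ↔ x ∈ s ∨ ∃ p ∈ groups, C p = true ∧ x = p.1 := by
  induction groups generalizing s with
  | nil => simp
  | cons p rest ih =>
      rw [List.foldl_cons]
      by_cases hc : C p = true
      · rw [if_pos hc, ih]
        simp only [PySem.Set.mem_add, List.exists_mem_cons_iff]
        tauto
      · rw [if_neg hc, ih]
        simp only [List.exists_mem_cons_iff]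
        tauto

lemma pv_mem_step (s : PySem.Set String) (f x : String) :
    x ∈ pvStep s f ↔ x ∈ s ∨ ∃ p ∈ pvGroups,
      (p.2.any (fun k => PySem.Str.isIn k (PySem.Str.lower f))) = true ∧ x = p.1 := by
  unfold pvStep
  exact pv_mem_condAdd pvGroups (fun p => p.2.any (fun k => PySem.Str.isIn k (PySem.Str.lower f))) s x

lemma pv_mem_fold (files : List String) (s : PySem.Set String) (x : String) :
    x ∈ files.foldl pvStep s ↔ x ∈ s ∨ ∃ f ∈ files, ∃ p ∈ pvGroups,
      (p.2.any (fun k => PySem.Str.isIn k (PySem.Str.lower f))) = true ∧ x = p.1 := by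
  induction files generalizing s with
  | nil => simp
  | cons f rest ih =>
      rw [List.foldl_cons, ih, pv_mem_step]
      rw [List.exists_mem_cons_iff, or_assoc]

lemma pv_contains_api (files : List String) :
    PySem.Set.contains (files.foldl pvStep PySem.Set.empty) "api"
      = files.any (fun f => PySem.Str.isIn "api" (PySem.Str.lower f)) := by
  rw [Bool.eq_iff_iff, PySem.Set.contains_iff, pv_mem_fold, List.any_eq_true]
  simp [pvGroups, PySem.Set.empty]

lemma pv_contains_db (files : List String) :
    PySem.Set.contains (files.foldl pvStep PySem.Set.empty) "db"
      = files.any (fun f => ["database", "db"].any (fun k => PySem.Str.isIn k (PySem.Str.lower f))) := by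
  rw [Bool.eq_iff_iff, PySem.Set.contains_iff, pv_mem_fold, List.any_eq_true]
  simp [pvGroups, PySem.Set.empty]

lemma pv_contains_payment (files : List String) :
    PySem.Set.contains (files.foldl pvStep PySem.Set.empty) "payment"
      = files.any (fun f => PySem.Str.isIn "payment" (PySem.Str.lower f)) := by
  rw [Bool.eq_iff_iff, PySem.Set.contains_iff, pv_mem_fold, List.any_eq_true]
  simp [pvGroups, PySem.Set.empty]

lemma pv_contains_phi (files : List String) :
    PySem.Set.contains (files.foldl pvStep PySem.Set.empty) "phi"
      = files.any (fun f => ["phi", "patient"].any (fun k => PySem.Str.isIn k (PySem.Str.lower f))) := by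
  rw [Bool.eq_iff_iff, PySem.Set.contains_iff, pv_mem_fold, List.any_eq_true]
  simp [pvGroups, PySem.Set.empty]

-- ===== VERDICT (by name: the statement is the Claim_ definition above) =====
theorem generate_monitoring_plan_py_spec : Claim_equal_generate_monitoring_plan_py := by
  intro files _
  show _ = generate_monitoring_plan_py_alt files
  simp only [generate_monitoring_plan_py, generate_monitoring_plan_py_alt, pvPriority, List.find?]
  rw [pv_contains_api, pv_contains_db, pv_contains_payment, pv_contains_phi]
  generalize files.any (fun f => PySem.Str.isIn "api" (PySem.Str.lower f)) = a
  generalize files.any (fun f => ["database", "db"].any (fun k => PySem.Str.isIn k (PySem.Str.lower f))) = b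
  generalize files.any (fun f => PySem.Str.isIn "payment" (PySem.Str.lower f)) = c
  generalize files.any (fun f => ["phi", "patient"].any (fun k => PySem.Str.isIn k (PySem.Str.lower f))) = d
  cases a <;> cases b <;> cases c <;> cases d <;> rfl
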